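-- pv_equiv track=rewrite | github.com/kkw-11/Problem_Solving | 코테/LINE/4.py | solution
-- ===== SOURCE A (Python) =====
-- def solution(abilities, k):
--     answer = 0
--     gaps = []
--     if len(abilities) % 2 == 1:
--         abilities.append(0)
--     abilities.sort(reverse=True)
--
--     for i in range(0,len(abilities)-1,2):
--         gaps.append((abilities[i]-abilities[i+1], abilities[i], abilities[i+1]))
--     gaps.sort(reverse=True)
--
--     for gap in gaps:
--         if k>0:
--             k -= 1
--             answer += gap[1]
--         else:
--             answer += gap[2]
--
--     return answer
-- ===== SOURCE B (Python) =====
-- def solution(abilities, k):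
--     # Same observable mutation of `abilities` as the original:
--     # pad with 0 when the length is odd, then sort in place descending.
--     if len(abilities) % 2 == 1:
--         abilities.append(0)
--     abilities.sort(reverse=True)
--     answer = 0
--     gaps = []
--     for i in range(1, len(abilities), 2):
--         answer += abilities[i]
--         gaps.append(abilities[i - 1] - abilities[i])
--     # Selection by repeated max-extraction: k rounds (stopping when no gaps
--     # remain) each take the current largest gap; no sort of the gaps at all.
--     r = k
--     while r > 0 and gaps:
--         g = max(gaps)
--         answer += g
--         gaps.remove(g)
--         r -= 1
--     return answer
-- ===== Notes on version B (the rewrite author's own statement) =====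
-- stated objective: alternative
-- what changed: Replaces A's sort of the gap triples plus the counter loop that branches hi/lo per pair by a selection algorithm: accumulate all pair lows in one pass, then run up to k rounds of extract-the-maximum gap (max + remove) with no sorting of the gaps at all.
import Mathlib
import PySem

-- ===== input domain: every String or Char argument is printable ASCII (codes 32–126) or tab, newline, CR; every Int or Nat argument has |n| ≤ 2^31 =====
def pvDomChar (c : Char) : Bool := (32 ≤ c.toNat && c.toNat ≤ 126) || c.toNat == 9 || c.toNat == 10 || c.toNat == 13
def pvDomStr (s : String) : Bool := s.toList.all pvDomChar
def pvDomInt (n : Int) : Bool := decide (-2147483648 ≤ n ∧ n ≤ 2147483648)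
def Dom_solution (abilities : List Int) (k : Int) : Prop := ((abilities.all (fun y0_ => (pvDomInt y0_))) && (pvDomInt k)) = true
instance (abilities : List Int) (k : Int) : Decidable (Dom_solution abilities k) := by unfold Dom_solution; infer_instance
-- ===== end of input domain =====

-- B replaces A's sort of the gap triples + the counting loop that branches hi/lo per pair by
-- selection: one pass accumulates the pair lows, then up to k rounds of extract-the-maximum
-- gap (max + remove), with no sorting of the gaps (objective: alternative algorithm).
-- Equivalence is about the RETURN value; both Pythons mutate `abilities` identically
-- (append 0 when odd length, in-place descending sort).

-- ===== PORT A =====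
def solution (abilities : List Int) (k : Int) : Int :=
  let abs1 := if PySem.Int.mod (abilities.length : Int) 2 == 1 then abilities ++ [0] else abilities
  let abs2 := PySem.List.sorted abs1 (fun x => x) true
  let gaps := (PySem.List.pyRange 0 ((abs2.length : Int) - 1) 2).foldl
      (fun acc i => acc ++ [(PySem.List.pyGetD abs2 i 0 - PySem.List.pyGetD abs2 (i + 1) 0,
                             PySem.List.pyGetD abs2 i 0, PySem.List.pyGetD abs2 (i + 1) 0)]) []
  -- gaps.sort(reverse=True): Python compares the 3-tuples lexicographically; since the third
  -- component is determined by the first two (lo = hi - diff, so a tie on (diff, hi) is a tie on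
  -- the whole triple), the stable two-key sort sorted2 produces exactly Python's list.
  let gaps2 := PySem.List.sorted2 gaps (fun g => g.1) (fun g => g.2.1) true
  (gaps2.foldl (fun (s : Int × Int) g => if s.1 > 0 then (s.1 - 1, s.2 + g.2.1) else (s.1, s.2 + g.2.2)) (k, 0)).2

-- ===== PORT B =====
-- B's while loop: while r > 0 and gaps: g = max(gaps); answer += g; gaps.remove(g); r -= 1.
-- max(gaps) is PySem.List.max? (first maximum) and gaps.remove(g) is PySem.List.remove?;
-- the .getD defaults only guard the branches Python never reaches (gaps is nonempty, g ∈ gaps).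
def bloop (r : Int) (gs : List Int) : Int :=
  if _h : 0 < r ∧ gs ≠ [] then
    let g := (PySem.List.max? gs (fun x => x)).getD 0
    g + bloop (r - 1) ((PySem.List.remove? gs g).getD [])
  else 0
termination_by gs.length
decreasing_by
  have hlen : 0 < gs.length := List.length_pos_of_ne_nil _h.2
  cases hm : PySem.List.max? gs (fun x => x) with
  | none => exact absurd ((PySem.List.max?_eq_none_iff gs (fun x => x)).mp hm) _h.2
  | some m =>
    have hmem := PySem.List.max?_mem hm
    simp only [Option.getD_some]
    rw [PySem.List.remove?_eq_some_erase gs m hmem, Option.getD_some]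
    rw [List.length_erase_of_mem hmem]
    omega

def solution_alt (abilities : List Int) (k : Int) : Int :=
  let abs1 := if PySem.Int.mod (abilities.length : Int) 2 == 1 then abilities ++ [0] else abilities
  let abs2 := PySem.List.sorted abs1 (fun x => x) true
  let st := (PySem.List.pyRange 1 (abs2.length : Int) 2).foldl
      (fun (s : Int × List Int) i =>
        (s.1 + PySem.List.pyGetD abs2 i 0,
         s.2 ++ [PySem.List.pyGetD abs2 (i - 1) 0 - PySem.List.pyGetD abs2 i 0])) (0, [])
  st.1 + bloop k st.2

-- ===== PRECONDITION & SPEC =====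
def Spec_solution (abilities : List Int) (k : Int) (out : Int) : Prop := out = solution_alt abilities k
instance (abilities : List Int) (k : Int) (out : Int) : Decidable (Spec_solution abilities k out) := by unfold Spec_solution; infer_instance

-- ===== CLAIM (what is proved, stated in full; the proofs are below) =====
def Claim_equal_solution : Prop := ∀ (abilities : List Int) (k : Int), Dom_solution abilities k → Spec_solution abilities k (solution abilities k)

-- ===== LEMMAS AND PROOFS =====

-- insertBy into a Pairwise-R list stays Pairwise R when `before` decides R (a transitive total-ish relation).
lemma insertBy_pairwise {α : Type} (R : α → α → Prop)
    (htrans : ∀ a b c, R a b → R b c → R a c) (before : α → α → Bool)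
    (h1 : ∀ a b, before a b = true → R a b) (h2 : ∀ a b, before a b = false → R b a)
    (x : α) : ∀ ys : List α, ys.Pairwise R → (PySem.List.insertBy before x ys).Pairwise R := by
  intro ys
  induction ys with
  | nil =>
    intro _
    simp [PySem.List.insertBy]
  | cons y ys ih =>
    intro h
    rw [List.pairwise_cons] at h
    have hins : PySem.List.insertBy before x (y :: ys) =
        if before x y then x :: y :: ys else y :: PySem.List.insertBy before x ys := rfl
    by_cases hb : before x y = true
    · rw [hins, if_pos hb]
      refine List.pairwise_cons.mpr ⟨?_, List.pairwise_cons.mpr h⟩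
      intro z hz
      rcases List.mem_cons.mp hz with rfl | hz'
      · exact h1 _ _ hb
      · exact htrans _ _ _ (h1 _ _ hb) (h.1 z hz')
    · rw [hins, if_neg hb]
      refine List.pairwise_cons.mpr ⟨?_, ih h.2⟩
      intro z hz
      rcases (PySem.List.mem_insertBy before x z ys).mp hz with rfl | hz'
      · exact h2 _ _ (by simpa using hb)
      · exact h.1 z hz'

lemma foldl_insertBy_pairwise {α : Type} (R : α → α → Prop)
    (htrans : ∀ a b c, R a b → R b c → R a c) (before : α → α → Bool)
    (h1 : ∀ a b, before a b = true → R a b) (h2 : ∀ a b, before a b = false → R b a) :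
    ∀ (xs acc : List α), acc.Pairwise R →
      (xs.foldl (fun acc x => PySem.List.insertBy before x acc) acc).Pairwise R := by
  intro xs
  induction xs with
  | nil => intro acc h; simpa using h
  | cons x xs ih =>
    intro acc h
    simpa using ih _ (insertBy_pairwise R htrans before h1 h2 x acc h)

-- reverse=True two-key sort is weakly descending in the first key.
lemma sorted2_pairwise_rev_fst {α : Type} (xs : List α) (k1 k2 : α → Int) :
    (PySem.List.sorted2 xs k1 k2 true).Pairwise (fun a b => k1 b ≤ k1 a) := by
  unfold PySem.List.sorted2
  apply foldl_insertBy_pairwise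
  · intro a b c hab hbc; omega
  · intro a b hb
    simp at hb
    rcases hb with h | ⟨h, _⟩ <;> omega
  · intro a b hb
    simp at hb
    omega
  · exact List.Pairwise.nil

-- A's second for-loop, characterised: lows plus the first k (clamped) of the (hi - lo) column.
lemma loopA (gs : List (Int × Int × Int)) :
    ∀ (k a : Int),
      (gs.foldl (fun (s : Int × Int) g =>
          if s.1 > 0 then (s.1 - 1, s.2 + g.2.1) else (s.1, s.2 + g.2.2)) (k, a)).2
        = a + (gs.map (fun g => g.2.2)).sum
            + ((gs.map (fun g => g.2.1 - g.2.2)).take k.toNat).sum := by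
  induction gs with
  | nil => intro k a; simp
  | cons g gs ih =>
    intro k a
    by_cases hk : k > 0
    · have hnat : k.toNat = (k - 1).toNat + 1 := by omega
      rw [List.foldl_cons, if_pos hk, ih, hnat]
      simp [List.take_succ_cons]
      ring
    · have hnat : k.toNat = 0 := by omega
      rw [List.foldl_cons, if_neg hk, ih, hnat]
      simp
      ring

-- Descending sort of a list whose (first) maximum is g: g moves to the head, the rest is
-- the descending sort of the list with one copy of g removed.
lemma sortedDesc_cons_max (gs : List Int) (g : Int) (hg : g ∈ gs)
    (hmax : ∀ y ∈ gs, y ≤ g) :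
    PySem.List.sorted gs (fun x => x) true = g :: PySem.List.sorted (gs.erase g) (fun x => x) true := by
  apply PySem.List.eq_of_perm_of_pairwise_le_of_injective (fun x : Int => -x) neg_injective
  · exact (PySem.List.sorted_perm ..).trans
      ((List.perm_cons_erase hg).trans ((PySem.List.sorted_perm ..).symm.cons g))
  · exact (PySem.List.sorted_pairwise_rev gs (fun x => x)).imp (fun h => by omega)
  · refine List.pairwise_cons.mpr ⟨?_, (PySem.List.sorted_pairwise_rev ..).imp (fun h => by omega)⟩
    intro b hb
    have : b ∈ gs := List.mem_of_mem_erase ((PySem.List.mem_sorted ..).mp hb)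
    have := hmax b this
    omega

-- B's extract-max loop computes the sum of the first r (clamped) elements of the descending sort.
lemma bloop_eq_aux : ∀ (n : Nat) (gs : List Int), gs.length ≤ n → ∀ (r : Int),
    bloop r gs = ((PySem.List.sorted gs (fun x => x) true).take r.toNat).sum := by
  intro n
  induction n with
  | zero =>
    intro gs hlen r
    have : gs = [] := List.eq_nil_of_length_eq_zero (by omega)
    subst this
    rw [bloop]
    simp [PySem.List.sorted]
  | succ n ih =>
    intro gs hlen r
    by_cases h : 0 < r ∧ gs ≠ []
    · cases hm : PySem.List.max? gs (fun x => x) with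
      | none => exact absurd ((PySem.List.max?_eq_none_iff gs (fun x => x)).mp hm) h.2
      | some g =>
        have hmem := PySem.List.max?_mem hm
        have hmax : ∀ y ∈ gs, y ≤ g := PySem.List.max?_isMax hm
        rw [bloop, dif_pos h]
        simp only [hm, Option.getD_some,
          PySem.List.remove?_eq_some_erase gs g hmem]
        rw [ih (gs.erase g) (by rw [List.length_erase_of_mem hmem]
                                have := List.length_pos_of_ne_nil h.2; omega) (r - 1)]
        rw [sortedDesc_cons_max gs g hmem hmax]
        have hnat : r.toNat = (r - 1).toNat + 1 := by omega
        rw [hnat, List.take_succ_cons]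
        simp
    · rw [bloop, dif_neg h]
      rcases not_and_or.mp h with hr | hgs
      · have : r.toNat = 0 := by omega
        simp [this]
      · have : gs = [] := not_not.mp hgs
        subst this
        simp [PySem.List.sorted]

lemma bloop_eq (gs : List Int) (r : Int) :
    bloop r gs = ((PySem.List.sorted gs (fun x => x) true).take r.toNat).sum :=
  bloop_eq_aux gs.length gs le_rfl r

-- The core identity, over the common list of (hi, lo) pairs.
lemma core (P : List (Int × Int)) (k : Int) :
    ((PySem.List.sorted2 (P.map (fun p => (p.1 - p.2, p.1, p.2)))
        (fun g => g.1) (fun g => g.2.1) true).foldl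
      (fun (s : Int × Int) g => if s.1 > 0 then (s.1 - 1, s.2 + g.2.1) else (s.1, s.2 + g.2.2))
      (k, 0)).2
    = (P.map (fun p => p.2)).sum + bloop k (P.map (fun p => p.1 - p.2)) := by
  set G := P.map (fun p => (p.1 - p.2, p.1, p.2)) with hG
  set GS := PySem.List.sorted2 G (fun g => g.1) (fun g => g.2.1) true with hGS
  have hperm : GS.Perm G := PySem.List.sorted2_perm ..
  rw [loopA, bloop_eq]
  -- lows
  have hlows : (GS.map (fun g => g.2.2)).sum = (P.map (fun p => p.2)).sum := by
    rw [(hperm.map (fun g => g.2.2)).sum_eq, hG, List.map_map]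
    rfl
  -- the diff column of GS is exactly the descending-sorted diffs
  have hcol : GS.map (fun g : Int × Int × Int => g.2.1 - g.2.2) = GS.map (fun g => g.1) := by
    apply List.map_congr_left
    intro g hg
    have : g ∈ G := hperm.mem_iff.mp hg
    rw [hG] at this
    obtain ⟨p, _, rfl⟩ := List.mem_map.mp this
    rfl
  have hfirst : GS.map (fun g : Int × Int × Int => g.1)
      = PySem.List.sorted (P.map (fun p => p.1 - p.2)) (fun x => x) true := by
    apply List.Perm.eq_of_pairwise (le := fun a b : Int => b ≤ a)
    · intro a b _ _ h1 h2; omega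
    · exact List.Pairwise.map (f := fun g : Int × Int × Int => g.1) (fun a b h => h)
        (sorted2_pairwise_rev_fst G (fun g => g.1) (fun g => g.2.1))
    · exact PySem.List.sorted_pairwise_rev ..
    · refine ((hperm.map (fun g => g.1)).trans ?_).trans
        (PySem.List.sorted_perm (P.map (fun p => p.1 - p.2)) (fun x => x) true).symm
      rw [hG, List.map_map]
      exact List.Perm.refl _
  rw [hlows, hcol, hfirst]
  ring

-- range(1, L, 2) enumerates exactly the successors of range(0, L-1, 2).
lemma range_step2 (L : Int) :
    PySem.List.pyRange 1 L 2 = (PySem.List.pyRange 0 (L - 1) 2).map (fun i => i + 1) := by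
  rw [PySem.List.pyRange_of_pos 1 L (by omega), PySem.List.pyRange_of_pos 0 (L - 1) (by omega),
    List.map_map]
  by_cases h : 1 < L
  · rw [if_pos h, if_pos (show (0:Int) < L - 1 by omega)]
    rw [show (L - 1 - 0 + 2 - 1) = (L - 1 + 2 - 1) from by ring]
    apply List.map_congr_left
    intro a _
    simp
    omega
  · rw [if_neg h, if_neg (show ¬ (0:Int) < L - 1 by omega)]
    simp

-- ===== VERDICT (by name: the statement is the Claim_ definition above) =====
theorem solution_spec : Claim_equal_solution := by
  intro abilities k _
  unfold Spec_solution solution solution_alt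
  simp only [PySem.List.foldl_append_singleton_eq_map, List.nil_append]
  set xs := PySem.List.sorted (if (PySem.Int.mod (abilities.length : Int) 2 == 1) = true then abilities ++ [0] else abilities) (fun x => x) true with hxs
  -- B's single loop, split into the running sum of lows and the list of gaps
  rw [range_step2, List.foldl_map,
    PySem.List.foldl_prod_mk (fun (a : Int) (i : Int) => a + PySem.List.pyGetD xs (i + 1) 0)
      (fun (b : List Int) (i : Int) => b ++ [PySem.List.pyGetD xs (i + 1 - 1) 0 - PySem.List.pyGetD xs (i + 1) 0])]
  rw [PySem.List.foldl_add, PySem.List.foldl_append_singleton_eq_map]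
  simp only [zero_add, List.nil_append, add_sub_cancel_right]
  -- both sides are now indexed by P, the list of (hi, lo) pairs
  rw [show (fun i => (PySem.List.pyGetD xs i 0 - PySem.List.pyGetD xs (i + 1) 0, PySem.List.pyGetD xs i 0, PySem.List.pyGetD xs (i + 1) 0))
      = (fun p : Int × Int => (p.1 - p.2, p.1, p.2)) ∘ (fun i => (PySem.List.pyGetD xs i 0, PySem.List.pyGetD xs (i + 1) 0)) from rfl,
    ← List.map_map]
  rw [show (fun i => PySem.List.pyGetD xs (i + 1) 0)
      = (fun p : Int × Int => p.2) ∘ (fun i => (PySem.List.pyGetD xs i 0, PySem.List.pyGetD xs (i + 1) 0)) from rfl,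
    ← List.map_map]
  rw [show (fun i => PySem.List.pyGetD xs i 0 - PySem.List.pyGetD xs (i + 1) 0)
      = (fun p : Int × Int => p.1 - p.2) ∘ (fun i => (PySem.List.pyGetD xs i 0, PySem.List.pyGetD xs (i + 1) 0)) from rfl,
    ← List.map_map]
  exact core _ k
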